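-- pv_equiv track=rewrite | github.com/codemelo/kimbot-v1 | message_processor.py | extract_num_str
-- ===== SOURCE A (Python) =====
-- def extract_num_str(str):
--     num_str = ''
--     for char in str:
--         if char.isdigit():
--             num_str += char
--         elif num_str:  # if we already have a number and encounter a non-numeric character
--             break
--
--     if num_str:
--         return num_str
--     else:
--         return None
-- ===== SOURCE B (Python) =====
-- from itertools import groupby
--
--
-- def extract_num_str(str):
--     for is_digit, run in groupby(str, key=lambda c: c.isdigit()):
--         if is_digit:
--             return ''.join(run)
--     return None
-- ===== Notes on version B (the rewrite author's own statement) =====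
-- stated objective: idiomatic
-- what changed: Instead of A's flag-guarded accumulating loop with break, B partitions the string into maximal runs of equal digit-ness with itertools.groupby and returns the first digit run.
import Mathlib
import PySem

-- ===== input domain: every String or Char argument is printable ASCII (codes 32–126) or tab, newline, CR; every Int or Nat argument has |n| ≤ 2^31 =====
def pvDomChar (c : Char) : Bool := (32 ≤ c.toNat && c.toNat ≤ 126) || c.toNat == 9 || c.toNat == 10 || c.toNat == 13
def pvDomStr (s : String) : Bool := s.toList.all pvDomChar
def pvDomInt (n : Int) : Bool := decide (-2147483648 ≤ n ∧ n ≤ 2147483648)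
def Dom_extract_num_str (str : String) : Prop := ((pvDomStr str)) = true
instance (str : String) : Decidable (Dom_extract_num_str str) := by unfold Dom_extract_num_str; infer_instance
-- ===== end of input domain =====

-- B replaces A's flag-guarded accumulating loop by an itertools.groupby partition into
-- maximal digit/non-digit runs, returning the first digit run (idiomatic; same value).

-- ===== PORT A =====
-- A's for-loop with break: recursion over the remaining chars, carrying the accumulated digits.
def extractNumLoopA : List Char → List Char → List Char
  | [], acc => acc
  | c :: cs, acc =>
    if PySem.Chars.isdigit c then extractNumLoopA cs (acc ++ [c])
    else if acc ≠ [] then acc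
    else extractNumLoopA cs acc

def extract_num_str (str : String) : Option String :=
  let num_str := extractNumLoopA str.toList []
  if num_str ≠ [] then some (String.ofList num_str) else none

-- ===== PORT B =====
-- itertools.groupby with key isdigit: maximal runs of chars whose key agrees, with the key.
def pyGroupBy (f : Char → Bool) : List Char → List (Bool × List Char)
  | [] => []
  | c :: cs =>
    (f c, c :: cs.takeWhile (fun d => f d == f c)) ::
      pyGroupBy f (cs.dropWhile (fun d => f d == f c))
termination_by l => l.length
decreasing_by
  simpa using Nat.lt_succ_of_le (List.length_dropWhile_le _ cs)

-- B's for-loop over the groups: return the first run whose key is true.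
def findDigitRun : List (Bool × List Char) → Option (List Char)
  | [] => none
  | (isDig, run) :: rest => if isDig then some run else findDigitRun rest

def extract_num_str_alt (str : String) : Option String :=
  match findDigitRun (pyGroupBy PySem.Chars.isdigit str.toList) with
  | some run => some (String.ofList run)
  | none => none

-- ===== PRECONDITION & SPEC =====
def Spec_extract_num_str (str : String) (out : Option String) : Prop := out = extract_num_str_alt str
instance (str : String) (out : Option String) : Decidable (Spec_extract_num_str str out) := by unfold Spec_extract_num_str; infer_instance

-- ===== CLAIM (what is proved, stated in full; the proofs are below) =====
def Claim_equal_extract_num_str : Prop := ∀ (str : String), Dom_extract_num_str str → Spec_extract_num_str str (extract_num_str str)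

-- ===== LEMMAS AND PROOFS =====
theorem extractNumLoopA_ne_nil (cs acc : List Char) (h : acc ≠ []) :
    extractNumLoopA cs acc = acc ++ cs.takeWhile (fun c => PySem.Chars.isdigit c) := by
  induction cs generalizing acc with
  | nil => simp [extractNumLoopA]
  | cons c cs ih =>
    simp only [extractNumLoopA, List.takeWhile]
    by_cases hd : PySem.Chars.isdigit c
    · simp [hd, ih (acc ++ [c]) (by simp)]
    · simp [hd, h]

theorem extractNumLoopA_nil (cs : List Char) :
    extractNumLoopA cs [] =
      (cs.dropWhile (fun c => !PySem.Chars.isdigit c)).takeWhile (fun c => PySem.Chars.isdigit c) := by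
  induction cs with
  | nil => simp [extractNumLoopA]
  | cons c cs ih =>
    simp only [extractNumLoopA, List.dropWhile]
    by_cases hd : PySem.Chars.isdigit c
    · simp [hd, extractNumLoopA_ne_nil cs [c] (by simp)]
    · simp [hd, ih]

theorem dropWhile_idem (p : Char → Bool) (l : List Char) :
    (l.dropWhile p).dropWhile p = l.dropWhile p := by
  induction l with
  | nil => simp
  | cons c cs ih =>
    by_cases h : p c
    · simpa [List.dropWhile, h] using ih
    · simp [List.dropWhile, h]

theorem findDigitRun_pyGroupBy (p : Char → Bool) (l : List Char) :
    findDigitRun (pyGroupBy p l) =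
      (let r := (l.dropWhile (fun c => !p c)).takeWhile p
       if r = [] then none else some r) := by
  induction hn : l.length using Nat.strong_induction_on generalizing l with
  | _ n ih =>
    cases l with
    | nil => simp [pyGroupBy, findDigitRun]
    | cons c cs =>
      by_cases hc : p c
      · simp only [pyGroupBy, findDigitRun, hc, if_pos]
        simp [List.dropWhile, hc]
      · have hc' : p c = false := by simpa using hc
        have heq : (fun d => p d == false) = (fun d : Char => !p d) := by funext d; simp
        simp only [pyGroupBy, findDigitRun, hc', Bool.false_eq_true, if_false]
        rw [heq]
        have hrec := ih (cs.dropWhile (fun d => !p d)).length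
          (by subst hn; simpa using Nat.lt_succ_of_le (List.length_dropWhile_le _ cs))
          (cs.dropWhile (fun d => !p d)) rfl
        rw [show List.dropWhile (fun c => !p c) (c :: cs) = List.dropWhile (fun c => !p c) cs
              from by simp [List.dropWhile, hc'],
            hrec, dropWhile_idem]

-- ===== VERDICT (by name: the statement is the Claim_ definition above) =====
theorem extract_num_str_spec : Claim_equal_extract_num_str := by
  intro s _
  unfold Spec_extract_num_str extract_num_str extract_num_str_alt
  rw [findDigitRun_pyGroupBy]
  simp only [extractNumLoopA_nil]
  split_ifs <;> simp_all
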